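-- pv_equiv track=rewrite | github.com/macaulishchina/MIND | tests/eval/prompt_opt/run_multi_model.py | count_stl_lines
-- ===== SOURCE A (Python) =====
-- def count_stl_lines(output: str) -> dict:
--     """Count STL line types in output."""
--     lines = [l.strip() for l in output.strip().split("\n") if l.strip()]
--     refs = sum(1 for l in lines if l.startswith("@"))
--     stmts = sum(1 for l in lines if l.startswith("$"))
--     notes = sum(1 for l in lines if l.startswith("note("))
--     comments = sum(1 for l in lines if l.startswith("#"))
--     other = len(lines) - refs - stmts - notes - comments
--     return {
--         "total": len(lines),
--         "refs": refs,
--         "stmts": stmts,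
--         "notes": notes,
--         "comments": comments,
--         "other": other,
--     }
-- ===== SOURCE B (Python) =====
-- def count_stl_lines(output: str) -> dict:
--     """Count STL line types in output (single classifying pass)."""
--     lines = [l.strip() for l in output.strip().split("\n") if l.strip()]
--     refs = stmts = notes = comments = other = 0
--     for l in lines:
--         if l.startswith("@"):
--             refs += 1
--         elif l.startswith("$"):
--             stmts += 1
--         elif l.startswith("note("):
--             notes += 1
--         elif l.startswith("#"):
--             comments += 1
--         else:
--             other += 1
--     return {
--         "total": len(lines),
--         "refs": refs,
--         "stmts": stmts,
--         "notes": notes,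
--         "comments": comments,
--         "other": other,
--     }
-- ===== Notes on version B (the rewrite author's own statement) =====
-- stated objective: simpler
-- what changed: Replaces A's four independent counting scans plus a subtraction-derived 'other' with one classifying pass over the lines using an if/elif/else chain that also counts 'other' directly.
import Mathlib
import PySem

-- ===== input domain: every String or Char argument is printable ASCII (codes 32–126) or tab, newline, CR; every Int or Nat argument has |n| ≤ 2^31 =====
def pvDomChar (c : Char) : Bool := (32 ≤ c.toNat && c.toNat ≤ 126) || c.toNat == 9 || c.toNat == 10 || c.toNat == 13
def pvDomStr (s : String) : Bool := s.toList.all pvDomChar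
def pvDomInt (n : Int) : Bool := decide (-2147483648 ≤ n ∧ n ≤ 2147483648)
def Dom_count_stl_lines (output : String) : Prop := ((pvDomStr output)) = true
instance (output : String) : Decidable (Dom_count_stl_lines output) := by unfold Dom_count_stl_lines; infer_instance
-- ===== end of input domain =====

-- B replaces A's four independent counting scans (and subtraction-based 'other') with one
-- classifying pass over the lines; same return value, chosen for simplicity, not speed.


-- ===== PORT A =====
-- lines = [l.strip() for l in output.strip().split("\n") if l.strip()]  (exact: Chars.* are the
-- Python-exact string primitives over List Char; split with nonempty sep "\n" is Chars.splitOn)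
def pvStlLines (output : String) : List (List Char) :=
  ((PySem.Chars.splitOn (PySem.Chars.strip output.toList) ['\n']).map PySem.Chars.strip).filter
    (fun l => l ≠ [])

def count_stl_lines (output : String) : List (String × Int) :=
  let lines := pvStlLines output
  let refs : Int := lines.countP (fun l => PySem.Chars.startswith l ['@'])
  let stmts : Int := lines.countP (fun l => PySem.Chars.startswith l ['$'])
  let notes : Int := lines.countP (fun l => PySem.Chars.startswith l ['n','o','t','e','('])
  let comments : Int := lines.countP (fun l => PySem.Chars.startswith l ['#'])
  let other : Int := (lines.length : Int) - refs - stmts - notes - comments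
  [("total", (lines.length : Int)), ("refs", refs), ("stmts", stmts), ("notes", notes),
   ("comments", comments), ("other", other)]

-- ===== PORT B =====
-- one classifying pass: state (refs, stmts, notes, comments, other)
def pvStep (acc : Int × Int × Int × Int × Int) (l : List Char) : Int × Int × Int × Int × Int :=
  if PySem.Chars.startswith l ['@'] then (acc.1 + 1, acc.2.1, acc.2.2.1, acc.2.2.2.1, acc.2.2.2.2)
  else if PySem.Chars.startswith l ['$'] then (acc.1, acc.2.1 + 1, acc.2.2.1, acc.2.2.2.1, acc.2.2.2.2)
  else if PySem.Chars.startswith l ['n','o','t','e','('] then (acc.1, acc.2.1, acc.2.2.1 + 1, acc.2.2.2.1, acc.2.2.2.2)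
  else if PySem.Chars.startswith l ['#'] then (acc.1, acc.2.1, acc.2.2.1, acc.2.2.2.1 + 1, acc.2.2.2.2)
  else (acc.1, acc.2.1, acc.2.2.1, acc.2.2.2.1, acc.2.2.2.2 + 1)

def count_stl_lines_alt (output : String) : List (String × Int) :=
  let lines := pvStlLines output
  let c := lines.foldl pvStep (0, 0, 0, 0, 0)
  [("total", (lines.length : Int)), ("refs", c.1), ("stmts", c.2.1), ("notes", c.2.2.1),
   ("comments", c.2.2.2.1), ("other", c.2.2.2.2)]

-- ===== PRECONDITION & SPEC =====
def Spec_count_stl_lines (output : String) (out : List (String × Int)) : Prop := out = count_stl_lines_alt output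
instance (output : String) (out : List (String × Int)) : Decidable (Spec_count_stl_lines output out) := by unfold Spec_count_stl_lines; infer_instance

-- ===== CLAIM (what is proved, stated in full; the proofs are below) =====
def Claim_equal_count_stl_lines : Prop := ∀ (output : String), Dom_count_stl_lines output → Spec_count_stl_lines output (count_stl_lines output)

-- ===== LEMMAS AND PROOFS =====

-- two prefixes with different first characters cannot both be prefixes of the same string
theorem pv_sw_disj (s : List Char) (a b : Char) (ta tb : List Char) (hab : a ≠ b)
    (h : PySem.Chars.startswith s (a :: ta) = true) :
    PySem.Chars.startswith s (b :: tb) = false := by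
  rw [PySem.Chars.startswith_iff] at h
  rw [Bool.eq_false_iff]
  intro hb
  rw [PySem.Chars.startswith_iff] at hb
  cases s with
  | nil => simp at h
  | cons x xs =>
      rw [List.cons_prefix_cons] at h hb
      exact hab (h.1.trans hb.1.symm)

-- loop invariant for B's single pass: each component accumulates the corresponding countP of A
theorem pv_fold_inv (lines : List (List Char)) (r s n c o : Int) :
    lines.foldl pvStep (r, s, n, c, o) =
      (r + lines.countP (fun l => PySem.Chars.startswith l ['@']),
       s + lines.countP (fun l => PySem.Chars.startswith l ['$']),
       n + lines.countP (fun l => PySem.Chars.startswith l ['n','o','t','e','(']),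
       c + lines.countP (fun l => PySem.Chars.startswith l ['#']),
       o + ((lines.length : Int)
            - lines.countP (fun l => PySem.Chars.startswith l ['@'])
            - lines.countP (fun l => PySem.Chars.startswith l ['$'])
            - lines.countP (fun l => PySem.Chars.startswith l ['n','o','t','e','('])
            - lines.countP (fun l => PySem.Chars.startswith l ['#']))) := by
  induction lines generalizing r s n c o with
  | nil => simp
  | cons l rest ih =>
      by_cases h1 : PySem.Chars.startswith l ['@'] = true
      · have h2 := pv_sw_disj l '@' '$' [] [] (by decide) h1
        have h3 := pv_sw_disj l '@' 'n' [] ['o','t','e','('] (by decide) h1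
        have h4 := pv_sw_disj l '@' '#' [] [] (by decide) h1
        simp [List.foldl_cons, pvStep, h1, h2, h3, h4, ih]; omega
      · by_cases h2 : PySem.Chars.startswith l ['$'] = true
        · have h3 := pv_sw_disj l '$' 'n' [] ['o','t','e','('] (by decide) h2
          have h4 := pv_sw_disj l '$' '#' [] [] (by decide) h2
          simp [List.foldl_cons, pvStep, h1, h2, h3, h4, ih]; omega
        · by_cases h3 : PySem.Chars.startswith l ['n','o','t','e','('] = true
          · have h4 := pv_sw_disj l 'n' '#' ['o','t','e','('] [] (by decide) h3
            simp [List.foldl_cons, pvStep, h1, h2, h3, h4, ih]; omega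
          · by_cases h4 : PySem.Chars.startswith l ['#'] = true
            · simp [List.foldl_cons, pvStep, h1, h2, h3, h4, ih]; omega
            · simp [List.foldl_cons, pvStep, h1, h2, h3, h4, ih]; omega

-- ===== VERDICT (by name: the statement is the Claim_ definition above) =====
theorem count_stl_lines_spec : Claim_equal_count_stl_lines := by
  intro output _
  simp only [Spec_count_stl_lines, count_stl_lines, count_stl_lines_alt, pv_fold_inv]
  norm_num
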